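-- pv_equiv track=rewrite | github.com/dragoeast/projects | data_structures/dynamic_programming/token_transform.py | token_transform
-- ===== SOURCE A (Python) =====
-- def token_transform(tokens, s):
--     """Return the transformed version of string s,
--     where all tokens(included the nested ones too) replaced.
--     >>> tokens = {\
--         '$LOCATION$': '$ANIMAL$ park',\
--         '$ANIMAL$': 'dog',\
--     }
--     >>> token_transform(tokens, 'Walk the $ANIMAL$ in the $LOCATION$!')
--     'Walk the dog in the dog park!'
--     """
--     result_lst = []
--     i, j = 0, 1
--     while i < len(s):
--         if s[i] != "$":
--             result_lst.append(s[i])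
--             i += 1
--             j = i + 1
--         elif s[j] != "$":
--             j += 1
--         else:
--             key = s[i:j+1]
--             value = tokens[key]
--             evaluated_value = token_transform(tokens, s=value)
--             tokens[key] = evaluated_value #this will act as a memoization
--             result_lst.append(evaluated_value)
--             i = j + 1
--             j = i + 1
--
--     return ''.join(result_lst)
-- ===== SOURCE B (Python) =====
-- def token_transform(tokens, s):
--     """Return s with all $NAME$ tokens (including nested ones) replaced,
--     memoizing evaluated tokens back into `tokens` (same side effect as A)."""
--     parts = s.split('$')
--     out = []
--     for idx, part in enumerate(parts):
--         if idx % 2 == 0: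
--             out.append(part)
--         else:
--             key = '$' + part + '$'
--             evaluated = token_transform(tokens, tokens[key])
--             tokens[key] = evaluated
--             out.append(evaluated)
--     return ''.join(out)
-- ===== Notes on version B (the rewrite author's own statement) =====
-- stated objective: faster
-- what changed: Replaces A's two-pointer per-character scan by one s.split('$') pass: even segments are appended literally, odd segments are token names looked up, recursively evaluated and memoized back into tokens exactly as A does; nested tokens are handled by the same recursion as A.
import Mathlib
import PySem

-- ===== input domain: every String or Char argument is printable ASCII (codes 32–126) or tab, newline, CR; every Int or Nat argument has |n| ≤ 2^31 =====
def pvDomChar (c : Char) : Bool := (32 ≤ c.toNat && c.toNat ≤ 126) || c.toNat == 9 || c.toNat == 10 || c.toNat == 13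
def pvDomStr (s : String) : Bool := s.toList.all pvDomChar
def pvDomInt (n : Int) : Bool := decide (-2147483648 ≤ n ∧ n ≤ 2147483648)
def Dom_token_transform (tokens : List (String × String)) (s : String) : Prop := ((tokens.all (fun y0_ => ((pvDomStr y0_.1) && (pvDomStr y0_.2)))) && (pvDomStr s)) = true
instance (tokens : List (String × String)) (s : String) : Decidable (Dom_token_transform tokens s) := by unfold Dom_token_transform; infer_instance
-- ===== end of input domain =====

-- B replaces A's two-pointer per-character scan by one split on '$' (even segments
-- literal, odd segments token names), keeping the same recursion on nested tokens and
-- the same memoization; measurably faster in Python (C-level split/join per call).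
-- Both programs mutate `tokens` (memoization); the equivalence proved here is about
-- the RETURN value only (B performs the same insertions in the same order).

-- ===== PORT A =====

-- tokens as a PySem.Dict over code-point lists (strings handled on the List Char side)
def dictOf (tokens : List (String × String)) : PySem.Dict (List Char) (List Char) :=
  PySem.Dict.ofList (tokens.map fun p => (p.1.toList, p.2.toList))

-- A's `while i < len(s)` loop; `ev` is the recursive call `token_transform(tokens, s=value)`.
-- `sf` counts the loop's iterations (each step moves i or j right, so 2*len+2 units always
-- suffice; `none` on 0 is proven unreachable under Pre_); every other `none` is exactly a
-- Python exception (IndexError on s[j], KeyError on tokens[key]).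
def aScanF (ev : PySem.Dict (List Char) (List Char) → List Char →
      Option (List Char × PySem.Dict (List Char) (List Char))) :
    Nat → PySem.Dict (List Char) (List Char) → List Char → Int → Int →
    List (List Char) → Option (List (List Char) × PySem.Dict (List Char) (List Char))
  | 0, _, _, _, _, _ => none
  | sf+1, d, cs, i, j, acc =>
    if i < (cs.length : Int) then
      match PySem.List.pyGet? cs i with
      | none => none
      | some ci =>
        if ci ≠ '$' then
          aScanF ev sf d cs (i+1) (i+2) (acc ++ [[ci]])
        else
          match PySem.List.pyGet? cs j with
          | none => none
          | some cj =>
            if cj ≠ '$' then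
              aScanF ev sf d cs i (j+1) acc
            else
              let key := PySem.List.slice cs (some i) (some (j+1))
              match d.get? key with
              | none => none
              | some value =>
                match ev d value with
                | none => none
                | some (evaluated, d1) =>
                  aScanF ev sf (d1.insert key evaluated) cs (j+1) (j+2) (acc ++ [evaluated])
    else some (acc, d)

-- the recursion of A; `fuel` bounds the recursion depth only (Python's RecursionError /
-- divergence on cyclic tokens ↦ none; under Pre_ the depth is at most tokens.length + 1)
def aEval : Nat → PySem.Dict (List Char) (List Char) → List Char →
    Option (List Char × PySem.Dict (List Char) (List Char))
  | 0, _, _ => none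
  | f+1, d, cs =>
    (aScanF (aEval f) (2 * cs.length + 2) d cs 0 1 []).map fun r => (r.1.flatten, r.2)
      -- ''.join(result_lst)

def token_transform (tokens : List (String × String)) (s : String) : String :=
  match aEval (tokens.length + 2) (dictOf tokens) s.toList with
  | some (cs, _) => String.ofList cs
  | none => ""                                   -- unreachable under Pre_ (exception in Python)

-- ===== PORT B =====

-- hand port of s.split('$') (single-character separator; exact: split never returns [],
-- the empty string splits to [''])
def splitD : List Char → List (List Char)
  | [] => [[]]
  | c :: rest =>
    if c = '$' then [] :: splitD rest
    else
      match splitD rest with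
      | p :: ps => (c :: p) :: ps
      | [] => [[c]]       -- unreachable: splitD never returns []

-- B's `for idx, part in enumerate(parts)` loop; `ev` is the recursive call
def bLoopF (ev : PySem.Dict (List Char) (List Char) → List Char →
      Option (List Char × PySem.Dict (List Char) (List Char))) :
    PySem.Dict (List Char) (List Char) → List (List Char) → Nat →
    List (List Char) → Option (List (List Char) × PySem.Dict (List Char) (List Char))
  | d, [], _, out => some (out, d)
  | d, p :: ps, idx, out =>
    if idx % 2 = 0 then bLoopF ev d ps (idx+1) (out ++ [p])
    else
      match d.get? ('$' :: p ++ ['$']) with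
      | none => none
      | some v =>
        match ev d v with
        | none => none
        | some (evaluated, d1) =>
          bLoopF ev (d1.insert ('$' :: p ++ ['$']) evaluated) ps (idx+1) (out ++ [evaluated])

-- the recursion of B, with the same depth-only fuel as A's port
def bEval : Nat → PySem.Dict (List Char) (List Char) → List Char →
    Option (List Char × PySem.Dict (List Char) (List Char))
  | 0, _, _ => none
  | f+1, d, cs =>
    (bLoopF (bEval f) d (splitD cs) 0 []).map fun r => (r.1.flatten, r.2)   -- ''.join(out)

def token_transform_alt (tokens : List (String × String)) (s : String) : String :=
  match bEval (tokens.length + 2) (dictOf tokens) s.toList with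
  | some (cs, _) => String.ofList cs
  | none => ""                                   -- unreachable under Pre_ (exception in Python)

-- ===== PRECONDITION & SPEC =====

-- the token names referenced by a string: the segments between the (2k+1)-th and
-- (2k+2)-th '$' (a trailing unclosed name is also listed)
def refNamesGo : Bool → List Char → List Char → List (List Char)
  | inTok, cur, [] => if inTok then [cur] else []
  | inTok, cur, c :: rest =>
    if c = '$' then
      if inTok then cur :: refNamesGo false [] rest
      else refNamesGo true [] rest
    else
      if inTok then refNamesGo true (cur ++ [c]) rest
      else refNamesGo false [] rest

def refNames (cs : List Char) : List (List Char) := refNamesGo false [] cs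

def keyOf (p : List Char) : List Char := '$' :: p ++ ['$']

-- the value a Python dict built from the pair list associates to key (last write wins)
def lastVal (tokens : List (String × String)) (key : List Char) : Option (List Char) :=
  tokens.foldl (fun acc p => if p.1.toList = key then some p.2.toList else acc) none

-- the keys a key's stored value references
def childKeys (tokens : List (String × String)) (k : List Char) : List (List Char) :=
  match lastVal tokens k with
  | some v => (refNames v).map keyOf
  | none => []

-- n rounds of closure of a key set under childKeys
def reachFrom (tokens : List (String × String)) : Nat → List (List Char) → List (List Char)
  | 0, S => S
  | n+1, S => reachFrom tokens n ((S ++ S.flatMap (childKeys tokens)).dedup)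

-- a reachable key is fine: present, its value has an even number of '$' (no unclosed
-- token), and it is not on a reference cycle
def keyOkB (tokens : List (String × String)) (k : List Char) : Bool :=
  match lastVal tokens k with
  | none => false
  | some v =>
    (v.count '$') % 2 == 0 &&
    !((reachFrom tokens (tokens.length + 2) (childKeys tokens k)).contains k)

-- Pre_ excludes exactly the inputs on which A raises: an odd number of '$' in s or in the
-- value of a token reachable from s (IndexError), a reachable token key that is missing
-- (KeyError), or a cyclic reference among reachable tokens (A recurses forever /
-- RecursionError); token entries never reached from s are unconstrained.
def preB (tokens : List (String × String)) (s : String) : Bool :=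
  (s.toList.count '$') % 2 == 0 &&
  (reachFrom tokens (tokens.length + 2) ((refNames s.toList).map keyOf)).all (keyOkB tokens)

def Pre_token_transform (tokens : List (String × String)) (s : String) : Prop :=
  preB tokens s = true

instance (tokens : List (String × String)) (s : String) : Decidable (Pre_token_transform tokens s) := by
  unfold Pre_token_transform; infer_instance

def pvWitness_token_transform : (List (String × String)) × String :=
  ([("$LOCATION$", "$ANIMAL$ park"), ("$ANIMAL$", "dog")], "Walk the $ANIMAL$ in the $LOCATION$!")

def Spec_token_transform (tokens : List (String × String)) (s : String) (out : String) : Prop := out = token_transform_alt tokens s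
instance (tokens : List (String × String)) (s : String) (out : String) : Decidable (Spec_token_transform tokens s out) := by unfold Spec_token_transform; infer_instance

-- ===== CLAIM (what is proved, stated in full; the proofs are below) =====
def Claim_equal_token_transform : Prop := ∀ (tokens : List (String × String)) (s : String), Dom_token_transform tokens s → Pre_token_transform tokens s → Spec_token_transform tokens s (token_transform tokens s)

-- ===== LEMMAS AND PROOFS =====

-- dict invariant maintained by both runs: every key still holds its original value, or
-- the '$'-free result of a completed evaluation (the memoization)
def GoodR (tokens : List (String × String)) (d : PySem.Dict (List Char) (List Char)) : Prop :=
  ∀ k, d.get? k = lastVal tokens k ∨ ∃ v, d.get? k = some v ∧ v.count '$' = 0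

-- the segments at odd indices of a split (the token names referenced)
def oddIdx {α : Type} : List α → List α
  | [] => []
  | [_] => []
  | _ :: q :: rest => q :: oddIdx rest

lemma splitD_cases (cs : List Char) :
    (cs.contains '$' = false ∧ splitD cs = [cs]) ∨
    (∃ p cs', cs = p ++ '$' :: cs' ∧ p.contains '$' = false ∧ splitD cs = p :: splitD cs') := by
  induction cs with
  | nil => left; simp [splitD]
  | cons c rest ih =>
    by_cases hc : c = '$'
    · right
      exact ⟨[], rest, by simp [hc], by simp, by simp [splitD, hc]⟩
    · rcases ih with ⟨h1, h2⟩ | ⟨p, cs', he, hp, hs⟩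
      · left
        constructor
        · simp at h1 ⊢; exact ⟨fun h => hc h.symm, h1⟩
        · simp [splitD, hc, h2]
      · right
        refine ⟨c :: p, cs', by simp [he], ?_, ?_⟩
        · simp at hp ⊢; exact ⟨fun h => hc h.symm, hp⟩
        · simp [splitD, hc, hs]

lemma flatten_map_singleton (l : List Char) : (l.map fun c => [c]).flatten = l := by
  induction l with
  | nil => simp
  | cons c t ih => simp [ih]

lemma count_eq_zero_of_not_contains (cs : List Char) (h : cs.contains '$' = false) :
    cs.count '$' = 0 := by
  rw [List.count_eq_zero]
  simpa using h

lemma GoodR_insert (tokens : List (String × String)) (d : PySem.Dict (List Char) (List Char))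
    (k v : List Char) (hg : GoodR tokens d) (hv : v.count '$' = 0) :
    GoodR tokens (d.insert k v) := by
  intro k'
  rw [PySem.Dict.get?_insert]
  split_ifs with he
  · exact Or.inr ⟨v, rfl, hv⟩
  · exact hg k'

lemma length_splitD : ∀ (n : Nat) (cs : List Char), cs.length ≤ n →
    (splitD cs).length = cs.count '$' + 1 := by
  intro n
  induction n with
  | zero =>
    intro cs hl
    rw [Nat.le_zero, List.length_eq_zero_iff] at hl
    subst hl
    simp [splitD]
  | succ n ih =>
    intro cs hl
    rcases splitD_cases cs with ⟨hnod, hsp⟩ | ⟨p, cs', he, hp, hsp⟩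
    · rw [hsp, count_eq_zero_of_not_contains cs hnod]
      simp
    · subst he
      rw [hsp]
      have hrec := ih cs' (by simp at hl; omega)
      simp only [List.length_cons, hrec, List.count_append, List.count_cons]
      rw [count_eq_zero_of_not_contains p hp]
      simp

lemma refNamesGo_skip (p : List Char) (hp : p.contains '$' = false) (rest : List Char) :
    refNamesGo false [] (p ++ rest) = refNamesGo false [] rest := by
  induction p with
  | nil => simp
  | cons c t ih =>
    have h2 : ¬'$' = c ∧ '$' ∉ t := by simpa using hp
    rw [List.cons_append, refNamesGo, if_neg (fun h => h2.1 h.symm)]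
    exact ih (by simpa using h2.2)

lemma refNamesGo_tok_nil (q : List Char) (hq : q.contains '$' = false) :
    ∀ cur, refNamesGo true cur q = [cur ++ q] := by
  induction q with
  | nil => intro cur; simp [refNamesGo]
  | cons c t ih =>
    intro cur
    have h2 : ¬'$' = c ∧ '$' ∉ t := by simpa using hq
    rw [refNamesGo, if_neg (fun h => h2.1 h.symm), ih (by simpa using h2.2)]
    simp

lemma refNamesGo_tok (q : List Char) (hq : q.contains '$' = false) :
    ∀ cur rest, refNamesGo true cur (q ++ '$' :: rest) = (cur ++ q) :: refNamesGo false [] rest := by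
  induction q with
  | nil => intro cur rest; simp [refNamesGo]
  | cons c t ih =>
    intro cur rest
    have h2 : ¬'$' = c ∧ '$' ∉ t := by simpa using hq
    rw [List.cons_append, refNamesGo, if_neg (fun h => h2.1 h.symm), ih (by simpa using h2.2) (cur ++ [c]) rest]
    simp

lemma refNames_eq : ∀ (n : Nat) (cs : List Char), cs.length ≤ n →
    refNames cs = oddIdx (splitD cs) := by
  intro n
  induction n with
  | zero =>
    intro cs hl
    rw [Nat.le_zero, List.length_eq_zero_iff] at hl
    subst hl
    simp [refNames, refNamesGo, splitD, oddIdx]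
  | succ n ih =>
    intro cs hl
    rcases splitD_cases cs with ⟨hnod, hsp⟩ | ⟨p, cs1, he, hp, hsp⟩
    · rw [hsp]
      unfold refNames
      have := refNamesGo_skip cs hnod []
      simp only [List.append_nil] at this
      rw [this]
      simp [refNamesGo, oddIdx]
    · subst he
      rw [hsp]
      unfold refNames
      rw [refNamesGo_skip p hp, refNamesGo, if_pos rfl, if_neg (by simp)]
      rcases splitD_cases cs1 with ⟨hnod1, hsp1⟩ | ⟨q, cs2, he1, hq, hsp1⟩
      · rw [hsp1, refNamesGo_tok_nil cs1 hnod1 []]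
        simp [oddIdx]
      · subst he1
        rw [hsp1, refNamesGo_tok q hq [] cs2]
        simp only [List.nil_append, oddIdx]
        rw [← ih cs2 (by simp at hl; omega)]
        rfl

-- a '$'-free string references no tokens
lemma refNames_nil (v : List Char) (hv : v.count '$' = 0) : refNames v = [] := by
  have hnc : v.contains '$' = false := by
    rw [List.count_eq_zero] at hv
    simpa using hv
  rcases splitD_cases v with ⟨_, hsp⟩ | ⟨p, cs', he, _, _⟩
  · rw [refNames_eq v.length v le_rfl, hsp]; rfl
  · exfalso; rw [he] at hnc; simp at hnc

-- ----- reachability lemmas -----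

lemma self_mem_step (tokens : List (String × String)) (S : List (List Char)) :
    ∀ x ∈ S, x ∈ (S ++ S.flatMap (childKeys tokens)).dedup := by
  intro x hx
  simp [List.mem_dedup, hx]

lemma reachFrom_mono_n (tokens : List (String × String)) :
    ∀ (n : Nat) (S : List (List Char)) (x : List Char),
    x ∈ reachFrom tokens n S → x ∈ reachFrom tokens (n+1) S := by
  intro n
  induction n with
  | zero =>
    intro S x hx
    exact self_mem_step tokens S x hx
  | succ n ih =>
    intro S x hx
    exact ih _ x hx

lemma reachFrom_mono_le (tokens : List (String × String)) (m n : Nat) (hmn : m ≤ n)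
    (S : List (List Char)) (x : List Char) (hx : x ∈ reachFrom tokens m S) :
    x ∈ reachFrom tokens n S := by
  induction n with
  | zero =>
    have : m = 0 := by omega
    subst this; exact hx
  | succ n ih =>
    by_cases h : m = n + 1
    · subst h; exact hx
    · exact reachFrom_mono_n tokens n S x (ih (by omega))

lemma reachFrom_child (tokens : List (String × String)) :
    ∀ (n : Nat) (S : List (List Char)) (k : List Char), k ∈ reachFrom tokens n S →
    ∀ x ∈ childKeys tokens k, x ∈ reachFrom tokens (n+1) S := by
  intro n
  induction n with
  | zero =>
    intro S k hk x hx
    show x ∈ reachFrom tokens 0 _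
    simp only [reachFrom, List.mem_dedup, List.mem_append, List.mem_flatMap]
    exact Or.inr ⟨k, hk, hx⟩
  | succ n ih =>
    intro S k hk x hx
    exact ih _ k hk x hx

-- ----- the scan of A over a '$'-free stretch and over a token name -----

lemma aScanF_lit (ev : PySem.Dict (List Char) (List Char) → List Char →
      Option (List Char × PySem.Dict (List Char) (List Char)))
    (lit : List Char) (hl : lit.contains '$' = false) :
    ∀ (pre rest : List Char) (d : PySem.Dict (List Char) (List Char))
      (acc : List (List Char)) (sf : Nat),
    aScanF ev (sf + lit.length) d (pre ++ (lit ++ rest)) (pre.length : Int) ((pre.length : Int) + 1) acc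
      = aScanF ev sf d (pre ++ (lit ++ rest)) ((pre.length + lit.length : Nat) : Int)
          (((pre.length + lit.length : Nat) : Int) + 1) (acc ++ lit.map fun c => [c]) := by
  induction lit with
  | nil => intro pre rest d acc sf; simp
  | cons c lit ih =>
    intro pre rest d acc sf
    have hl2 : ¬'$' = c ∧ '$' ∉ lit := by simpa using hl
    have hc : c ≠ '$' := fun h => hl2.1 h.symm
    have hl' : lit.contains '$' = false := by simpa using hl2.2
    have hstep : (sf + (c :: lit).length) = (sf + lit.length) + 1 := by simp; omega
    rw [hstep]
    have hcs : pre ++ (c :: lit ++ rest) = pre ++ c :: (lit ++ rest) := by simp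
    have hlt : (pre.length : Int) < ((pre ++ (c :: lit ++ rest)).length : Int) := by
      simp; omega
    have hget : PySem.List.pyGet? (pre ++ (c :: lit ++ rest)) (pre.length : Int) = some c := by
      rw [hcs]; exact PySem.List.pyGet?_append_length pre _ c
    rw [aScanF, if_pos hlt, hget]
    simp only [ne_eq, hc, not_false_eq_true, if_pos]
    have e1 : (pre.length : Int) + 1 = (((pre ++ [c]).length : Nat) : Int) := by simp
    have e2 : (pre.length : Int) + 2 = (((pre ++ [c]).length : Nat) : Int) + 1 := by simp; omega
    have e3 : pre ++ (c :: lit ++ rest) = (pre ++ [c]) ++ (lit ++ rest) := by simp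
    rw [e1, e2, e3, ih hl' (pre ++ [c]) rest d (acc ++ [[c]]) sf]
    have e5 : (pre ++ [c]).length + lit.length = pre.length + (c :: lit).length := by
      simp; omega
    rw [e5]
    simp [List.append_assoc]

lemma aScanF_scan (ev : PySem.Dict (List Char) (List Char) → List Char →
      Option (List Char × PySem.Dict (List Char) (List Char)))
    (mid : List Char) (hm : mid.contains '$' = false) :
    ∀ (pre pre2 rest : List Char) (d : PySem.Dict (List Char) (List Char))
      (acc : List (List Char)) (sf : Nat),
    aScanF ev (sf + mid.length) d (pre ++ '$' :: (pre2 ++ (mid ++ '$' :: rest))) (pre.length : Int)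
        ((pre.length : Int) + 1 + (pre2.length : Int)) acc
      = aScanF ev sf d (pre ++ '$' :: (pre2 ++ (mid ++ '$' :: rest))) (pre.length : Int)
          ((pre.length : Int) + 1 + ((pre2.length + mid.length : Nat) : Int)) acc := by
  induction mid with
  | nil => intro pre pre2 rest d acc sf; simp
  | cons c mid ih =>
    intro pre pre2 rest d acc sf
    have hm2 : ¬'$' = c ∧ '$' ∉ mid := by simpa using hm
    have hc : c ≠ '$' := fun h => hm2.1 h.symm
    have hm' : mid.contains '$' = false := by simpa using hm2.2
    have hstep : (sf + (c :: mid).length) = (sf + mid.length) + 1 := by simp; omega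
    rw [hstep]
    have hlt : (pre.length : Int) < ((pre ++ '$' :: (pre2 ++ (c :: mid ++ '$' :: rest))).length : Int) := by
      simp; omega
    have hgi : PySem.List.pyGet? (pre ++ '$' :: (pre2 ++ (c :: mid ++ '$' :: rest))) (pre.length : Int)
        = some '$' := PySem.List.pyGet?_append_length pre _ '$'
    have e0 : pre ++ '$' :: (pre2 ++ (c :: mid ++ '$' :: rest))
        = (pre ++ '$' :: pre2) ++ c :: (mid ++ '$' :: rest) := by simp
    have ej : (pre.length : Int) + 1 + (pre2.length : Int)
        = (((pre ++ '$' :: pre2).length : Nat) : Int) := by simp; omega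
    have hgj : PySem.List.pyGet? (pre ++ '$' :: (pre2 ++ (c :: mid ++ '$' :: rest)))
        ((pre.length : Int) + 1 + (pre2.length : Int)) = some c := by
      rw [ej, e0]; exact PySem.List.pyGet?_append_length _ _ c
    rw [aScanF, if_pos hlt, hgi]
    simp only [ne_eq, not_true_eq_false, if_false, hgj]
    simp only [hc, not_false_eq_true, if_pos]
    have e1 : (pre.length : Int) + 1 + (pre2.length : Int) + 1
        = (pre.length : Int) + 1 + (((pre2 ++ [c]).length : Nat) : Int) := by simp; omega
    have e2 : pre ++ '$' :: (pre2 ++ (c :: mid ++ '$' :: rest))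
        = pre ++ '$' :: ((pre2 ++ [c]) ++ (mid ++ '$' :: rest)) := by simp
    rw [e1, e2, ih hm' pre (pre2 ++ [c]) rest d acc sf]
    have e5 : (pre2 ++ [c]).length + mid.length = pre2.length + (c :: mid).length := by
      simp; omega
    rw [e5]

-- ----- the lockstep lemma: one call of A's scan against one pass of B's loop -----

lemma inner (tokens : List (String × String))
    (evA evB : PySem.Dict (List Char) (List Char) → List Char →
      Option (List Char × PySem.Dict (List Char) (List Char)))
    (OKv : List Char → Prop)
    (hev : ∀ d v, GoodR tokens d → OKv v → evA d v = evB d v ∧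
      ∀ out d', evB d v = some (out, d') → out.count '$' = 0 ∧ GoodR tokens d') :
    ∀ (n : Nat) (suffix : List Char), suffix.length ≤ n →
    ∀ (pre : List Char) (d : PySem.Dict (List Char) (List Char))
      (acc accB : List (List Char)) (idx sf : Nat),
    GoodR tokens d → (splitD suffix).length % 2 = 1 → idx % 2 = 0 →
    acc.flatten = accB.flatten → suffix.length + 1 ≤ sf →
    (∀ q ∈ oddIdx (splitD suffix), ∀ d', GoodR tokens d' →
      ∀ v, d'.get? ('$' :: q ++ ['$']) = some v → OKv v) →
    ((aScanF evA sf d (pre ++ suffix) (pre.length : Int) ((pre.length : Int) + 1) acc).map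
        (fun r => (r.1.flatten, r.2))
      = (bLoopF evB d (splitD suffix) idx accB).map (fun r => (r.1.flatten, r.2)))
    ∧ ∀ l d', bLoopF evB d (splitD suffix) idx accB = some (l, d') →
        GoodR tokens d' ∧ l.flatten.count '$' = accB.flatten.count '$' := by
  intro n
  induction n with
  | zero =>
    intro suffix hl
    rw [Nat.le_zero, List.length_eq_zero_iff] at hl
    subst hl
    intro pre d acc accB idx sf hg hpar hidx hacc hsf hkeys
    obtain ⟨sf', rfl⟩ : ∃ sf', sf = sf' + 1 := ⟨sf - 1, by omega⟩
    constructor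
    · rw [aScanF, if_neg (by simp)]
      simp [splitD, bLoopF, hidx, hacc]
    · intro l d' hb
      simp only [splitD, bLoopF, hidx, if_pos] at hb
      simp only [Option.some.injEq, Prod.mk.injEq] at hb
      obtain ⟨hb1, hb2⟩ := hb
      subst hb1; subst hb2
      simp [hg]
  | succ n ih =>
    intro suffix hl pre d acc accB idx sf hg hpar hidx hacc hsf hkeys
    rcases splitD_cases suffix with ⟨hnod, hsp⟩ | ⟨p, cs1, he, hp, hsp⟩
    · -- no '$' in the whole suffix: pure literal copy
      obtain ⟨sf1, rfl⟩ : ∃ sf1, sf = sf1 + suffix.length := ⟨sf - suffix.length, by omega⟩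
      have h1 := aScanF_lit evA suffix hnod pre [] d acc sf1
      rw [List.append_nil] at h1
      obtain ⟨sf2, rfl⟩ : ∃ sf2, sf1 = sf2 + 1 := ⟨sf1 - 1, by omega⟩
      constructor
      · rw [h1, aScanF, if_neg (by simp)]
        rw [hsp]
        simp [bLoopF, hidx, flatten_map_singleton, hacc]
      · intro l d' hb
        rw [hsp] at hb
        simp only [bLoopF, hidx, if_pos] at hb
        simp only [Option.some.injEq, Prod.mk.injEq] at hb
        obtain ⟨hb1, hb2⟩ := hb
        subst hb1; subst hb2
        refine ⟨hg, ?_⟩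
        simp [count_eq_zero_of_not_contains suffix hnod]
    · -- suffix = p ++ '$' :: cs1
      rcases splitD_cases cs1 with ⟨hnod1, hsp1⟩ | ⟨q, cs2, he1, hq, hsp1⟩
      · -- two parts only: even split count, excluded by the parity hypothesis
        exfalso
        rw [hsp, hsp1] at hpar
        simp at hpar
      · -- suffix = p ++ '$' :: (q ++ '$' :: cs2)
        subst he1
        subst he
        have hlen : p.length + 1 + (q.length + 1 + cs2.length) + 1 ≤ sf := by
          simp only [List.length_append, List.length_cons] at hsf; omega
        obtain ⟨sf1, rfl⟩ : ∃ sf1, sf = sf1 + p.length := ⟨sf - p.length, by omega⟩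
        have h1 := aScanF_lit evA p hp pre ('$' :: (q ++ '$' :: cs2)) d acc sf1
        obtain ⟨sf2, rfl⟩ : ∃ sf2, sf1 = sf2 + q.length := ⟨sf1 - q.length, by omega⟩
        have eI : ((pre.length + p.length : Nat) : Int) = (((pre ++ p).length : Nat) : Int) := by simp
        have eCs : pre ++ (p ++ '$' :: (q ++ '$' :: cs2))
            = (pre ++ p) ++ '$' :: ([] ++ (q ++ '$' :: cs2)) := by simp
        have h2 := aScanF_scan evA q hq (pre ++ p) [] cs2 d (acc ++ p.map fun c => [c]) sf2
        have eJ : (((pre ++ p).length : Nat) : Int) + 1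
            = (((pre ++ p).length : Nat) : Int) + 1 + (([] : List Char).length : Int) := by simp
        obtain ⟨sf3, rfl⟩ : ∃ sf3, sf2 = sf3 + 1 := ⟨sf2 - 1, by omega⟩
        have hlt : (((pre ++ p).length : Nat) : Int)
            < (((pre ++ p) ++ '$' :: ([] ++ (q ++ '$' :: cs2))).length : Int) := by simp; omega
        have hgi : PySem.List.pyGet? ((pre ++ p) ++ '$' :: ([] ++ (q ++ '$' :: cs2)))
            (((pre ++ p).length : Nat) : Int) = some '$' :=
          PySem.List.pyGet?_append_length _ _ '$'
        have eJ2 : (((pre ++ p).length : Nat) : Int) + 1 + ((([] : List Char).length + q.length : Nat) : Int)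
            = ((((pre ++ p) ++ '$' :: q).length : Nat) : Int) := by simp; omega
        have eCs2 : (pre ++ p) ++ '$' :: ([] ++ (q ++ '$' :: cs2))
            = ((pre ++ p) ++ '$' :: q) ++ '$' :: cs2 := by simp
        have hgj : PySem.List.pyGet? ((pre ++ p) ++ '$' :: ([] ++ (q ++ '$' :: cs2)))
            ((((pre ++ p).length : Nat) : Int) + 1 + ((([] : List Char).length + q.length : Nat) : Int))
            = some '$' := by
          rw [eJ2, eCs2]; exact PySem.List.pyGet?_append_length _ _ '$'
        have ekey : PySem.List.slice ((pre ++ p) ++ '$' :: ([] ++ (q ++ '$' :: cs2)))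
            (some (((pre ++ p).length : Nat) : Int))
            (some ((((pre ++ p).length : Nat) : Int) + 1 + ((([] : List Char).length + q.length : Nat) : Int) + 1))
            = '$' :: q ++ ['$'] := by
          have eb : (((pre ++ p).length : Nat) : Int) + 1 + ((([] : List Char).length + q.length : Nat) : Int) + 1
              = (((pre ++ p).length : Nat) : Int) + ((q.length + 2 : Nat) : Int) := by simp; omega
          rw [eb, PySem.List.slice_natCast_add, List.drop_left]
          have : '$' :: ([] ++ (q ++ '$' :: cs2)) = ('$' :: q ++ ['$']) ++ cs2 := by simp
          rw [this, List.take_left' (by simp)]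
        -- reduce the A side to the token step
        have hAred : aScanF evA (sf3 + 1 + q.length + p.length) d
            (pre ++ (p ++ '$' :: (q ++ '$' :: cs2))) (pre.length : Int) ((pre.length : Int) + 1) acc
            = (match d.get? ('$' :: q ++ ['$']) with
               | none => none
               | some value =>
                 match evA d value with
                 | none => none
                 | some (evaluated, d1) =>
                   aScanF evA sf3 (d1.insert ('$' :: q ++ ['$']) evaluated)
                     ((pre ++ p) ++ '$' :: ([] ++ (q ++ '$' :: cs2)))
                     ((((pre ++ p).length : Nat) : Int) + 1 + ((([] : List Char).length + q.length : Nat) : Int) + 1)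
                     ((((pre ++ p).length : Nat) : Int) + 1 + ((([] : List Char).length + q.length : Nat) : Int) + 2)
                     ((acc ++ p.map fun c => [c]) ++ [evaluated])) := by
          rw [h1, eI, eCs, eJ, h2, aScanF, if_pos hlt, hgi]
          simp only [ne_eq, not_true_eq_false, if_false, hgj]
          rw [ekey]
          rfl
        rw [hsp, hsp1]
        simp only [bLoopF, hidx, if_pos]
        have hoddne : ¬ (idx + 1) % 2 = 0 := by omega
        simp only [hoddne, if_false]
        cases hgetk : d.get? ('$' :: q ++ ['$']) with
        | none =>
          constructor
          · rw [hAred, hgetk]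
          · intro l d' hb
            simp at hb
        | some v =>
          have hOK : OKv v := hkeys q (by rw [hsp, hsp1]; simp [oddIdx]) d hg v hgetk
          obtain ⟨hevEq, hevPost⟩ := hev d v hg hOK
          cases hevB : evB d v with
          | none =>
            constructor
            · rw [hAred, hgetk]
              dsimp only
              rw [hevEq, hevB]
            · intro l d' hb
              dsimp only at hb
              rw [hevB] at hb
              simp at hb
          | some r =>
            obtain ⟨ev0, d1⟩ := r
            obtain ⟨hev0, hd1⟩ := hevPost ev0 d1 hevB
            have hg1 : GoodR tokens (d1.insert ('$' :: q ++ ['$']) ev0) :=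
              GoodR_insert tokens d1 _ ev0 hd1 hev0
            -- continue after the token via the induction hypothesis
            have eJ3 : (((pre ++ p).length : Nat) : Int) + 1 + ((([] : List Char).length + q.length : Nat) : Int) + 1
                = ((((pre ++ p) ++ '$' :: q ++ ['$']).length : Nat) : Int) := by simp; omega
            have eJ5 : (((pre ++ p).length : Nat) : Int) + 1 + ((([] : List Char).length + q.length : Nat) : Int) + 2
                = ((((pre ++ p) ++ '$' :: q ++ ['$']).length : Nat) : Int) + 1 := by simp; omega
            have eCs3 : (pre ++ p) ++ '$' :: ([] ++ (q ++ '$' :: cs2))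
                = ((pre ++ p) ++ '$' :: q ++ ['$']) ++ cs2 := by simp
            have hparity2 : (splitD cs2).length % 2 = 1 := by
              rw [hsp, hsp1] at hpar; simp at hpar; omega
            have hkeys2 : ∀ r ∈ oddIdx (splitD cs2), ∀ d', GoodR tokens d' →
                ∀ v, d'.get? ('$' :: r ++ ['$']) = some v → OKv v := by
              intro r hr
              exact hkeys r (by rw [hsp, hsp1]; simp [oddIdx, hr])
            obtain ⟨ihEq, ihPost⟩ := ih cs2 (by simp at hl; omega)
              ((pre ++ p) ++ '$' :: q ++ ['$']) (d1.insert ('$' :: q ++ ['$']) ev0)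
              ((acc ++ p.map fun c => [c]) ++ [ev0]) ((accB ++ [p]) ++ [ev0]) (idx + 1 + 1) sf3
              hg1 hparity2 (by omega)
              (by simp [hacc, flatten_map_singleton]) (by simp at hl ⊢; omega) hkeys2
            constructor
            · rw [hAred, hgetk]
              dsimp only
              rw [hevEq, hevB]
              dsimp only
              rw [eJ3, eJ5, eCs3]
              exact ihEq
            · intro l d' hb
              dsimp only at hb
              rw [hevB] at hb
              dsimp only at hb
              obtain ⟨hgd', hcnt⟩ := ihPost l d' hb
              refine ⟨hgd', ?_⟩
              rw [hcnt]
              simp [count_eq_zero_of_not_contains p hp, hev0]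

-- the full lockstep: A's recursion equals B's recursion at every depth fuel
lemma lockstep (tokens : List (String × String)) (S : List (List Char))
    (HK : ∀ k, k ∈ reachFrom tokens (tokens.length + 2) S →
      ∃ v, lastVal tokens k = some v ∧ v.count '$' % 2 = 0) :
    ∀ (f m : Nat) (d : PySem.Dict (List Char) (List Char)) (cs : List Char),
    m + f ≤ tokens.length + 2 → GoodR tokens d →
    cs.count '$' % 2 = 0 →
    (∀ p ∈ refNames cs, ('$' :: p ++ ['$']) ∈ reachFrom tokens m S) →
    aEval f d cs = bEval f d cs ∧
    ∀ out d', bEval f d cs = some (out, d') → out.count '$' = 0 ∧ GoodR tokens d' := by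
  intro f
  induction f with
  | zero =>
    intro m d cs _ _ _ _
    constructor
    · rfl
    · intro out d' hb; simp [bEval] at hb
  | succ f ihf =>
    intro m d cs hm hg heven hrefs
    have hpar : (splitD cs).length % 2 = 1 := by
      rw [length_splitD cs.length cs le_rfl]; omega
    -- the strings safe to evaluate one level deeper
    have hev : ∀ d v, GoodR tokens d →
        (v.count '$' % 2 = 0 ∧ ∀ p ∈ refNames v, ('$' :: p ++ ['$']) ∈ reachFrom tokens (m+1) S) →
        aEval f d v = bEval f d v ∧
        ∀ out d', bEval f d v = some (out, d') → out.count '$' = 0 ∧ GoodR tokens d' := by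
      intro d v hgd hOK
      exact ihf (m+1) d v (by omega) hgd hOK.1 hOK.2
    have hkeys : ∀ q ∈ oddIdx (splitD cs), ∀ d', GoodR tokens d' →
        ∀ v, d'.get? ('$' :: q ++ ['$']) = some v →
        (v.count '$' % 2 = 0 ∧ ∀ p ∈ refNames v, ('$' :: p ++ ['$']) ∈ reachFrom tokens (m+1) S) := by
      intro q hq d' hgd' v hget
      have hqS : ('$' :: q ++ ['$']) ∈ reachFrom tokens m S := by
        apply hrefs
        rw [refNames_eq cs.length cs le_rfl]
        exact hq
      rcases hgd' ('$' :: q ++ ['$']) with hlast | ⟨w, hw, hw0⟩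
      · rw [hget] at hlast
        obtain ⟨v', hv', hv'even⟩ := HK ('$' :: q ++ ['$'])
          (reachFrom_mono_le tokens m (tokens.length + 2) (by omega) S _ hqS)
        rw [hv'] at hlast
        obtain rfl : v = v' := by injection hlast
        refine ⟨hv'even, ?_⟩
        intro p hp
        have := reachFrom_child tokens m S ('$' :: q ++ ['$']) hqS ('$' :: p ++ ['$'])
        apply this
        simp only [childKeys, hv']
        exact List.mem_map_of_mem hp
      · rw [hget] at hw
        obtain rfl : v = w := by injection hw
        refine ⟨by omega, ?_⟩
        intro p hp
        rw [refNames_nil v hw0] at hp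
        simp at hp
    obtain ⟨hEq, hPost⟩ := inner tokens (aEval f) (bEval f)
      (fun v => v.count '$' % 2 = 0 ∧ ∀ p ∈ refNames v, ('$' :: p ++ ['$']) ∈ reachFrom tokens (m+1) S)
      hev cs.length cs le_rfl [] d [] [] 0 (2 * cs.length + 2)
      hg hpar (by omega) rfl (by omega) hkeys
    simp only [List.nil_append, List.length_nil, Nat.cast_zero, zero_add] at hEq
    constructor
    · show (aScanF (aEval f) (2 * cs.length + 2) d cs 0 1 []).map (fun r => (r.1.flatten, r.2))
        = (bLoopF (bEval f) d (splitD cs) 0 []).map (fun r => (r.1.flatten, r.2))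
      exact hEq
    · intro out d' hb
      have : (bLoopF (bEval f) d (splitD cs) 0 []).map (fun r => (r.1.flatten, r.2)) = some (out, d') := hb
      cases hbl : bLoopF (bEval f) d (splitD cs) 0 [] with
      | none => rw [hbl] at this; simp at this
      | some r =>
        obtain ⟨l, d''⟩ := r
        rw [hbl] at this
        simp only [Option.map_some, Option.some.injEq, Prod.mk.injEq] at this
        obtain ⟨h1, h2⟩ := this
        subst h1
        subst h2
        obtain ⟨hgd', hcnt⟩ := hPost l d'' hbl
        exact ⟨by simpa using hcnt, hgd'⟩

-- ----- bridging the initial dictionary to lastVal -----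

lemma get?_foldl_insert (l : List ((List Char) × (List Char))) :
    ∀ (d : PySem.Dict (List Char) (List Char)) (k : List Char),
    (l.foldl (fun acc p => acc.insert p.1 p.2) d).get? k
      = l.foldl (fun acc p => if p.1 = k then some p.2 else acc) (d.get? k) := by
  induction l with
  | nil => intro d k; rfl
  | cons a t ih =>
    intro d k
    rw [List.foldl_cons, List.foldl_cons, ih]
    congr 1
    rw [PySem.Dict.get?_insert]
    by_cases h : a.1 = k
    · rw [if_pos h, if_pos (h ▸ rfl)]
    · rw [if_neg h, if_neg (fun hh => h hh.symm)]

lemma lastVal_eq (tokens : List (String × String)) (k : List Char) :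
    lastVal tokens k = (dictOf tokens).get? k := by
  unfold lastVal dictOf PySem.Dict.ofList PySem.Dict.update
  rw [get?_foldl_insert, PySem.Dict.get?_empty, List.foldl_map]

-- ===== VERDICT (by name: the statement is the Claim_ definition above) =====
theorem token_transform_spec : Claim_equal_token_transform := by
  unfold Claim_equal_token_transform
  intro tokens s _ hPre
  unfold Spec_token_transform
  unfold Pre_token_transform preB at hPre
  simp only [Bool.and_eq_true, beq_iff_eq, List.all_eq_true] at hPre
  obtain ⟨hcnt, hok⟩ := hPre
  have HK : ∀ k, k ∈ reachFrom tokens (tokens.length + 2) ((refNames s.toList).map keyOf) →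
      ∃ v, lastVal tokens k = some v ∧ v.count '$' % 2 = 0 := by
    intro k hk
    have := hok k hk
    unfold keyOkB at this
    cases hlv : lastVal tokens k with
    | none => rw [hlv] at this; simp at this
    | some v =>
      rw [hlv] at this
      simp only [Bool.and_eq_true, beq_iff_eq] at this
      exact ⟨v, rfl, this.1⟩
  have hg0 : GoodR tokens (dictOf tokens) := fun k => Or.inl (lastVal_eq tokens k).symm
  have hrefs0 : ∀ p ∈ refNames s.toList,
      ('$' :: p ++ ['$']) ∈ reachFrom tokens 0 ((refNames s.toList).map keyOf) := by
    intro p hp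
    show ('$' :: p ++ ['$']) ∈ (refNames s.toList).map keyOf
    exact List.mem_map_of_mem hp
  obtain ⟨hEq, _⟩ := lockstep tokens ((refNames s.toList).map keyOf) HK
    (tokens.length + 2) 0 (dictOf tokens) s.toList (by omega) hg0 hcnt hrefs0
  unfold token_transform token_transform_alt
  rw [hEq]
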